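-- pv_equiv track=rewrite | github.com/BoeJaker/Vera-AI | Toolchain/toolchain.py | _analyse_dependencies
-- ===== SOURCE A (Python) =====
-- from typing import Any, Dict, Generator, Iterator, List, Optional, Set, Tuple
--
-- def _analyse_dependencies(
--     plan: List[Dict]
-- ) -> Dict[int, Set[int]]:
--     """Return {step_index: set_of_step_indices_it_depends_on}."""
--     deps: Dict[int, Set[int]] = {}
--     for i, step in enumerate(plan):
--         step_deps: Set[int] = set()
--         tool_input = str(step.get("input", ""))
--         if "{prev}" in tool_input and i > 0:
--             step_deps.add(i - 1)
--         for j in range(i):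
--             if f"{{step_{j + 1}}}" in tool_input:
--                 step_deps.add(j)
--         deps[i] = step_deps
--     return deps
-- ===== SOURCE B (Python) =====
-- from typing import Any, Dict, Generator, Iterator, List, Optional, Set, Tuple
--
--
-- def _extract_step_tokens(s: str) -> Set[str]:
--     """All digit-run tokens D such that '{step_D}' occurs in s (D maximal, non-empty)."""
--     toks: Set[str] = set()
--     for k in range(len(s)):
--         if s.startswith("{step_", k):
--             j = k + 6
--             while j < len(s) and s[j].isdigit():
--                 j += 1
--             if j > k + 6 and j < len(s) and s[j] == "}":
--                 toks.add(s[k + 6:j])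
--     return toks
--
--
-- def _step_deps(i: int, s: str) -> Set[int]:
--     """Dependencies of step i whose input text is s."""
--     deps: Set[int] = set()
--     if "{prev}" in s and i > 0:
--         deps.add(i - 1)
--     toks = _extract_step_tokens(s)
--     deps.update(j for j in range(i) if str(j + 1) in toks)
--     return deps
--
--
-- def _analyse_dependencies(
--     plan: List[Dict]
-- ) -> Dict[int, Set[int]]:
--     """Return {step_index: set_of_step_indices_it_depends_on}."""
--     return {i: _step_deps(i, str(step.get("input", ""))) for i, step in enumerate(plan)}
-- ===== Notes on version B (the rewrite author's own statement) =====
-- stated objective: alternative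
-- what changed: Instead of running a fresh substring search of '{step_<j+1>}' over the input for every earlier index j, B tokenises the input once per step into the set of digit tokens that actually occur as '{step_D}' placeholders and then decides each candidate j by an O(1) set-membership test on str(j+1).
import Mathlib
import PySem

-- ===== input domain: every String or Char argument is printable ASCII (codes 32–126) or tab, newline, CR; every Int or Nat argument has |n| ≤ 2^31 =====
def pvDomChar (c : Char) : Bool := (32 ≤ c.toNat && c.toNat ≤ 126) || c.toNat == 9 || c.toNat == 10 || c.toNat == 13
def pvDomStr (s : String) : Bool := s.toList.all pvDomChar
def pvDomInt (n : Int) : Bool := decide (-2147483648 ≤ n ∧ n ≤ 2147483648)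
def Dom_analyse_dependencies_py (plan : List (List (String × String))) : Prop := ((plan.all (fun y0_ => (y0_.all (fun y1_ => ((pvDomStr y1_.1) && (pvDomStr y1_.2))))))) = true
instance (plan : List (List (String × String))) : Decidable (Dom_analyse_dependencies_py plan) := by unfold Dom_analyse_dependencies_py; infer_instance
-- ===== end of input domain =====

-- B tokenises each step's input once into the set of '{step_D}' digit tokens and decides each
-- candidate j by a set-membership test, instead of A's fresh substring search per earlier index j.

-- ===== PORT A =====
-- literal transliteration of _analyse_dependencies: per step, probe '{step_(j+1)}' for every j < i
def analyse_dependencies_py (plan : List (List (String × String))) : List (Int × List Int) :=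
  ((PySem.List.enumerate plan).foldl
    (fun (deps : PySem.Dict Int (List Int)) p =>
      let i := p.1
      let tool_input := ((PySem.Dict.mk p.2).getD "input" "").toList
      let step_deps : PySem.Set Int :=
        if PySem.Chars.isIn ['{','p','r','e','v','}'] tool_input ∧ i > 0
        then PySem.Set.add PySem.Set.empty (i - 1) else PySem.Set.empty
      let step_deps :=
        (PySem.List.pyRange 0 i 1).foldl
          (fun (acc : PySem.Set Int) j =>
            if PySem.Chars.isIn ('{'::'s'::'t'::'e'::'p'::'_'::(PySem.Int.toChars (j + 1) ++ ['}'])) tool_input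
            then PySem.Set.add acc j else acc)
          step_deps
      deps.insert i step_deps)
    PySem.Dict.empty).items

-- ===== PORT B =====
-- _extract_step_tokens: the index loop 'for k in range(len(s))' is ported as structural recursion
-- over the suffixes of s (position k = suffix s.drop k); the digit while-loop is the maximal digit
-- run takeWhile, 'j < len(s) and s[j] == "}"' is head? of the rest, s[k+6:j] is that run. Exact.
def pvTokScan : List Char → PySem.Set (List Char) → PySem.Set (List Char)
  | [], toks => toks
  | c :: rest, toks =>
    let cs := c :: rest
    let toks' :=
      if PySem.Chars.startswith cs ['{','s','t','e','p','_'] then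
        let d := (cs.drop 6).takeWhile PySem.Chars.isdigit
        if d ≠ [] ∧ (cs.drop (6 + d.length)).head? = some '}'
        then PySem.Set.add toks d else toks
      else toks
    pvTokScan rest toks'

def pvExtractStepTokens (s : List Char) : PySem.Set (List Char) :=
  pvTokScan s PySem.Set.empty

def pvStepDeps (i : Int) (s : List Char) : PySem.Set Int :=
  let deps : PySem.Set Int :=
    if PySem.Chars.isIn ['{','p','r','e','v','}'] s ∧ i > 0
    then PySem.Set.add PySem.Set.empty (i - 1) else PySem.Set.empty
  let toks := pvExtractStepTokens s
  PySem.Set.update deps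
    ((PySem.List.pyRange 0 i 1).filter
      (fun j => PySem.Set.contains toks (PySem.Int.toChars (j + 1))))

-- dict comprehension over enumerate(plan) with the distinct keys 0..n-1 = the pair list itself
def analyse_dependencies_py_alt (plan : List (List (String × String))) : List (Int × List Int) :=
  (PySem.List.enumerate plan).map
    (fun p => (p.1, pvStepDeps p.1 ((PySem.Dict.mk p.2).getD "input" "").toList))

-- ===== PRECONDITION & SPEC =====
def Spec_analyse_dependencies_py (plan : List (List (String × String))) (out : List (Int × List Int)) : Prop := out = analyse_dependencies_py_alt plan
instance (plan : List (List (String × String))) (out : List (Int × List Int)) : Decidable (Spec_analyse_dependencies_py plan out) := by unfold Spec_analyse_dependencies_py; infer_instance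

-- ===== CLAIM (what is proved, stated in full; the proofs are below) =====
def Claim_equal_analyse_dependencies_py : Prop := ∀ (plan : List (List (String × String))), Dom_analyse_dependencies_py plan → Spec_analyse_dependencies_py plan (analyse_dependencies_py plan)

-- ===== LEMMAS AND PROOFS =====

-- the placeholder pattern '{step_' ++ d ++ '}'
def pvPat (d : List Char) : List Char := '{'::'s'::'t'::'e'::'p'::'_'::(d ++ ['}'])

lemma pv_isdigit_digitChar (k : Nat) (h : k < 10) : PySem.Chars.isdigit (Nat.digitChar k) = true := by
  interval_cases k <;> decide

lemma pv_toDigitsCore_digits : ∀ (fuel n : Nat) (acc : List Char),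
    (∀ c ∈ acc, PySem.Chars.isdigit c = true) →
    ∀ c ∈ Nat.toDigitsCore 10 fuel n acc, PySem.Chars.isdigit c = true := by
  intro fuel
  induction fuel with
  | zero => intro n acc h; rw [Nat.toDigitsCore]; exact h
  | succ f ih =>
    intro n acc h
    rw [Nat.toDigitsCore]
    have hacc : ∀ c ∈ (n % 10).digitChar :: acc, PySem.Chars.isdigit c = true := by
      intro c hc
      rcases List.mem_cons.mp hc with rfl | hc
      · exact pv_isdigit_digitChar _ (Nat.mod_lt _ (by omega))
      · exact h c hc
    split
    · exact hacc
    · exact ih (n / 10) _ hacc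

lemma pv_toDigitsCore_length : ∀ (fuel n : Nat) (acc : List Char),
    acc.length ≤ (Nat.toDigitsCore 10 fuel n acc).length := by
  intro fuel
  induction fuel with
  | zero => intro n acc; rw [Nat.toDigitsCore]
  | succ f ih =>
    intro n acc
    rw [Nat.toDigitsCore]
    split
    · simp
    · calc acc.length ≤ ((n % 10).digitChar :: acc).length := by simp
        _ ≤ _ := ih (n / 10) _

lemma pv_toChars_digits (n : Int) (h : 0 ≤ n) :
    PySem.Int.toChars n ≠ [] ∧ ∀ c ∈ PySem.Int.toChars n, PySem.Chars.isdigit c = true := by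
  have hn : ¬ n < 0 := by omega
  rw [PySem.Int.toChars]
  rw [if_neg hn]
  unfold Nat.toDigits
  constructor
  · intro hnil
    rw [Nat.toDigitsCore] at hnil
    revert hnil
    split
    · simp
    · intro hnil
      have := pv_toDigitsCore_length n.toNat (n.toNat / 10) [(n.toNat % 10).digitChar]
      rw [hnil] at this
      simp at this
  · exact pv_toDigitsCore_digits _ _ [] (by simp)

lemma pv_mem_pvTokScan (d : List Char) (hne : d ≠ [])
    (hdig : ∀ c ∈ d, PySem.Chars.isdigit c = true) :
    ∀ (s : List Char) (acc : PySem.Set (List Char)),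
      d ∈ pvTokScan s acc ↔ d ∈ acc ∨ pvPat d <:+: s := by
  intro s
  induction s with
  | nil =>
    intro acc
    simp [pvTokScan, pvPat, List.infix_nil]
  | cons c rest ih =>
    intro acc
    simp only [pvTokScan]
    rw [ih]
    rw [List.infix_cons_iff]
    by_cases hsw : PySem.Chars.startswith (c :: rest) ['{','s','t','e','p','_'] = true
    · obtain ⟨r, hr⟩ := (PySem.Chars.startswith_iff _ _).mp hsw
      -- drop 6 of cs is r
      have hdrop6 : (c :: rest).drop 6 = r := by rw [← hr]; rfl
      -- characterisation of a prefix match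
      have hpre : pvPat d <+: (c :: rest) ↔
          ((c :: rest).drop 6).takeWhile PySem.Chars.isdigit = d ∧
          ((c :: rest).drop (6 + d.length)).head? = some '}' := by
        constructor
        · rintro ⟨u, hu⟩
          have hr' : r = d ++ '}' :: u := by
            have : (c :: rest).drop 6 = d ++ '}' :: u := by
              rw [← hu]; simp [pvPat]
            rw [hdrop6] at this; exact this
          have htw : (r.takeWhile PySem.Chars.isdigit) = d := by
            rw [hr', List.takeWhile_append, List.takeWhile_eq_self_iff.mpr hdig,
              List.takeWhile_cons_of_neg (by decide)]
            simp
          constructor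
          · rw [hdrop6]; exact htw
          · have : (c :: rest).drop (6 + d.length) = '}' :: u := by
              rw [← List.drop_drop, hdrop6, hr']
              have : List.drop d.length (d ++ '}' :: u) = '}' :: u := List.drop_left
              simpa using this
            rw [this]
            rfl
        · rintro ⟨htw, hhd⟩
          have htp : d <+: r := by rw [← hdrop6, ← htw]; exact List.takeWhile_prefix _
          obtain ⟨u0, hu0⟩ := htp
          have hdu : (c :: rest).drop (6 + d.length) = u0 := by
            rw [← List.drop_drop, hdrop6, ← hu0]
            simpa using (List.drop_left (l₁ := d) (l₂ := u0))
          rw [hdu] at hhd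
          cases u0 with
          | nil => simp at hhd
          | cons x u' =>
            simp at hhd
            subst hhd
            refine ⟨u', ?_⟩
            rw [← hr, ← hu0]
            simp [pvPat]
      rw [if_pos hsw]
      by_cases hcond : ((c :: rest).drop 6).takeWhile PySem.Chars.isdigit ≠ [] ∧
          ((c :: rest).drop (6 + (((c :: rest).drop 6).takeWhile PySem.Chars.isdigit).length)).head? = some '}'
      · rw [if_pos hcond]
        rw [PySem.Set.mem_add]
        constructor
        · rintro ((h | h) | h)
          · exact Or.inl h
          · subst h
            exact Or.inr (Or.inl (hpre.mpr ⟨rfl, hcond.2⟩))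
          · exact Or.inr (Or.inr h)
        · rintro (h | h | h)
          · exact Or.inl (Or.inl h)
          · obtain ⟨htw, _⟩ := hpre.mp h
            exact Or.inl (Or.inr htw.symm)
          · exact Or.inr h
      · rw [if_neg hcond]
        constructor
        · rintro (h | h)
          · exact Or.inl h
          · exact Or.inr (Or.inr h)
        · rintro (h | h | h)
          · exact Or.inl h
          · exfalso
            obtain ⟨htw, hhd⟩ := hpre.mp h
            exact hcond ⟨by rw [htw]; exact hne, by rw [htw]; exact hhd⟩
          · exact Or.inr h
    · rw [if_neg hsw]
      constructor
      · rintro (h | h)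
        · exact Or.inl h
        · exact Or.inr (Or.inr h)
      · rintro (h | h | h)
        · exact Or.inl h
        · exfalso
          apply hsw
          rw [PySem.Chars.startswith_iff]
          exact List.IsPrefix.trans ⟨d ++ ['}'], rfl⟩ h
        · exact Or.inr h

lemma pv_contains_extract (s d : List Char) (hne : d ≠ [])
    (hdig : ∀ c ∈ d, PySem.Chars.isdigit c = true) :
    PySem.Set.contains (pvExtractStepTokens s) d = PySem.Chars.isIn (pvPat d) s := by
  rw [Bool.eq_iff_iff, PySem.Set.contains_iff, PySem.Chars.isIn_iff_infix,
    pvExtractStepTokens, pv_mem_pvTokScan d hne hdig]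
  simp [PySem.Set.empty]

-- A's inner per-step set, named so the outer fold can be rewritten (definitionally A's body)
def pvSdA (p : Int × List (String × String)) : PySem.Set Int :=
  let i := p.1
  let tool_input := ((PySem.Dict.mk p.2).getD "input" "").toList
  let step_deps : PySem.Set Int :=
    if PySem.Chars.isIn ['{','p','r','e','v','}'] tool_input ∧ i > 0
    then PySem.Set.add PySem.Set.empty (i - 1) else PySem.Set.empty
  (PySem.List.pyRange 0 i 1).foldl
    (fun (acc : PySem.Set Int) j =>
      if PySem.Chars.isIn ('{'::'s'::'t'::'e'::'p'::'_'::(PySem.Int.toChars (j + 1) ++ ['}'])) tool_input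
      then PySem.Set.add acc j else acc)
    step_deps

lemma pv_step_eq (p : Int × List (String × String)) :
    pvSdA p = pvStepDeps p.1 ((PySem.Dict.mk p.2).getD "input" "").toList := by
  unfold pvSdA pvStepDeps
  rw [show ∀ (s : PySem.Set Int) (l : List Int), PySem.Set.update s l = l.foldl PySem.Set.add s
      from fun _ _ => rfl]
  rw [List.foldl_filter]
  apply PySem.List.foldl_congr_mem
  intro acc j hj
  have hj0 : (0:Int) ≤ j := (PySem.List.mem_pyRange_one.mp hj).1
  obtain ⟨hne, hdig⟩ := pv_toChars_digits (j + 1) (by omega)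
  rw [pv_contains_extract _ _ hne hdig]
  rfl

-- ===== VERDICT (by name: the statement is the Claim_ definition above) =====
theorem analyse_dependencies_py_spec : Claim_equal_analyse_dependencies_py := by
  intro plan _
  unfold Spec_analyse_dependencies_py analyse_dependencies_py analyse_dependencies_py_alt
  show (List.foldl (fun (deps : PySem.Dict Int (List Int)) p => deps.insert p.1 (pvSdA p))
      PySem.Dict.empty (PySem.List.enumerate plan)).items = _
  rw [PySem.Dict.items_foldl_insert_fresh (PySem.List.enumerate plan) (fun p => p.1) pvSdA
      PySem.Dict.empty (fun a _ => PySem.Dict.contains_empty _)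
      (by rw [PySem.List.map_fst_enumerate]; exact PySem.List.nodup_pyRange_one _ _)]
  show List.map _ _ = _
  apply List.map_congr_left
  intro p _
  rw [pv_step_eq]
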